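-- pv_equiv track=rewrite | github.com/Kirill-max-bit/b7 | main79.py | min_zero_segment
-- ===== SOURCE A (Python) =====
-- def min_zero_segment(sequence):
--     min_len = float('inf')
--     current_len = 0
--     for num in sequence:
--         if num == 0:
--             current_len += 1
--         else:
--             if current_len > 0:
--                 min_len = min(min_len, current_len)
--             current_len = 0
--     if current_len > 0:
--         min_len = min(min_len, current_len)
--     return min_len if min_len != float('inf') else 0
-- ===== SOURCE B (Python) =====
-- def min_zero_segment(sequence):
--     # Positions of nonzero elements, with sentinels -1 and len(sequence).
--     # Each maximal zero run lies strictly between two consecutive marks a < b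
--     # and has length b - a - 1; take the minimum positive gap (0 if none).
--     n = len(sequence)
--     marks = [-1] + [i for i, x in enumerate(sequence) if x != 0] + [n]
--     gaps = [b - a - 1 for a, b in zip(marks, marks[1:]) if b - a > 1]
--     return min(gaps, default=0)
-- ===== Notes on version B (the rewrite author's own statement) =====
-- stated objective: alternative
-- what changed: B never counts zero runs: it collects the index positions of the nonzero elements (with sentinels -1 and n), forms the pairwise differences of consecutive positions, and returns the minimum positive gap minus one, whereas A makes a single pass with a current-run-length accumulator, in-loop minimum updates and a post-loop flush against a float('inf') sentinel.
import Mathlib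
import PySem

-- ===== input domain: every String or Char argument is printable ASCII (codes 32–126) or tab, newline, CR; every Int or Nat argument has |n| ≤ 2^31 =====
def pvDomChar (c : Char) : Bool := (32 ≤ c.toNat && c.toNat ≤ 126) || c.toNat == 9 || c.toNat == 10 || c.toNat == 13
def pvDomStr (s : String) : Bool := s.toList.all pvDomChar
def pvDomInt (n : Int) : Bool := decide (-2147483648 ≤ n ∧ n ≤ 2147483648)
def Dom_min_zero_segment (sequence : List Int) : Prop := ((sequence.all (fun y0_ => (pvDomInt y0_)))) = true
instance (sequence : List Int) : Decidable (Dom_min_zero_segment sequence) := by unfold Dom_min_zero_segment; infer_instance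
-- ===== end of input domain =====

-- B replaces A's run-length accumulator pass by index arithmetic: it lists the
-- positions of nonzero elements (with sentinels) and takes the minimum positive
-- gap between consecutive positions; objective: alternative.


-- ===== PORT A =====
-- min_len = float('inf') is modelled as `none : Option Int` (no finite minimum yet).
def pvOMin (m : Option Int) (v : Int) : Int :=
  match m with
  | none => v
  | some x => min x v

def pvAStep (st : Option Int × Int) (num : Int) : Option Int × Int :=
  if num == 0 then (st.1, st.2 + 1)
  else ((if st.2 > 0 then some (pvOMin st.1 st.2) else st.1), 0)

-- the (repeated) "if current_len > 0: min_len = min(min_len, current_len)" block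
def pvFlush (st : Option Int × Int) : Option Int :=
  if st.2 > 0 then some (pvOMin st.1 st.2) else st.1

def min_zero_segment (sequence : List Int) : Int :=
  match pvFlush (sequence.foldl pvAStep (none, 0)) with
  | none => 0        -- min_len == float('inf')
  | some m => m

-- ===== PORT B =====
-- [i for i, x in enumerate(sequence) if x != 0], with the running index as Int
def pvNz : Int → List Int → List Int
  | _, [] => []
  | i, x :: xs => if x ≠ 0 then i :: pvNz (i + 1) xs else pvNz (i + 1) xs

def min_zero_segment_alt (sequence : List Int) : Int :=
  let marks : List Int := (-1) :: (pvNz 0 sequence ++ [(sequence.length : Int)])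
  let gaps : List Int :=
    ((marks.zip marks.tail).filter (fun p => p.2 - p.1 > 1)).map (fun p => p.2 - p.1 - 1)
  match gaps with
  | [] => 0                      -- min(gaps, default=0) on an empty list
  | h :: t => t.foldl min h      -- Python's min over a nonempty list

-- ===== PRECONDITION & SPEC =====
def Spec_min_zero_segment (sequence : List Int) (out : Int) : Prop := out = min_zero_segment_alt sequence
instance (sequence : List Int) (out : Int) : Decidable (Spec_min_zero_segment sequence out) := by unfold Spec_min_zero_segment; infer_instance

-- ===== CLAIM (what is proved, stated in full; the proofs are below) =====
def Claim_equal_min_zero_segment : Prop := ∀ (sequence : List Int), Dom_min_zero_segment sequence → Spec_min_zero_segment sequence (min_zero_segment sequence)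

-- ===== LEMMAS AND PROOFS =====

-- abstract run-length list carrying the pending current-run length c
def pvR : Int → List Int → List Int
  | c, [] => if c > 0 then [c] else []
  | c, x :: xs => if x == 0 then pvR (c + 1) xs else (if c > 0 then [c] else []) ++ pvR 0 xs

def pvMFold (m : Option Int) (rs : List Int) : Option Int :=
  rs.foldl (fun acc r => some (pvOMin acc r)) m

theorem pvMFold_append (m : Option Int) (l1 l2 : List Int) :
    pvMFold m (l1 ++ l2) = pvMFold (pvMFold m l1) l2 := by
  simp [pvMFold, List.foldl_append]

-- A's fold+flush computes the min-fold over the run-length list pvR c xs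
theorem pvA_fold_eq : ∀ (xs : List Int) (m : Option Int) (c : Int),
    pvFlush (xs.foldl pvAStep (m, c)) = pvMFold m (pvR c xs) := by
  intro xs
  induction xs with
  | nil =>
    intro m c
    simp only [List.foldl_nil, pvR, pvFlush]
    split
    · simp [pvMFold]
    · simp [pvMFold]
  | cons x xs ih =>
    intro m c
    simp only [List.foldl_cons, pvAStep, pvR]
    by_cases hx : x == 0
    · simp only [hx, if_pos]
      exact ih m (c + 1)
    · simp only [hx, Bool.false_eq_true, if_neg, not_false_iff]
      rw [ih, pvMFold_append]
      congr 1
      by_cases hc : c > 0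
      · simp [pvMFold, hc]
      · simp [pvMFold, hc]

-- gap extraction along a mark list, recursively: the list B's zip+filter+map builds
def pvGaps : Int → List Int → List Int
  | _, [] => []
  | prev, b :: rest => (if b - prev > 1 then [b - prev - 1] else []) ++ pvGaps b rest

-- B's zip+filter+map over (prev :: l) equals the recursive gap extraction
theorem pvZipGaps_eq : ∀ (l : List Int) (prev : Int),
    ((((prev :: l).zip ((prev :: l).tail)).filter (fun p => p.2 - p.1 > 1)).map
        (fun p => p.2 - p.1 - 1)) = pvGaps prev l := by
  intro l
  induction l with
  | nil => intro prev; simp [pvGaps]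
  | cons b rest ih =>
    intro prev
    simp only [List.tail_cons, List.zip_cons_cons, List.filter_cons, pvGaps]
    by_cases h : b - prev > 1
    · simp only [h, decide_true, if_pos, List.map_cons]
      rw [← ih b]
      simp
    · simp only [h, decide_false, Bool.false_eq_true, if_neg, not_false_iff]
      rw [← ih b]
      simp

-- the gaps between consecutive nonzero marks are exactly the zero-run lengths
theorem pvGaps_eq_R : ∀ (xs : List Int) (i prev : Int),
    pvGaps prev (pvNz i xs ++ [i + (xs.length : Int)]) = pvR (i - prev - 1) xs := by
  intro xs
  induction xs with
  | nil =>
    intro i prev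
    simp only [pvNz, List.nil_append, pvGaps, List.length_nil, List.append_nil]
    rw [show i + ((0 : Nat) : Int) = i from by simp]
    by_cases h : i - prev > 1
    · rw [if_pos h]
      simp [pvR]
      omega
    · rw [if_neg h]
      simp [pvR]
      omega
  | cons x xs ih =>
    intro i prev
    have e : i + (((x :: xs).length : Nat) : Int) = (i + 1) + (xs.length : Int) := by
      simp only [List.length_cons]
      push_cast
      ring
    by_cases hx : x = 0
    · rw [show pvNz i (x :: xs) = pvNz (i + 1) xs from by simp [pvNz, hx], e, ih (i + 1) prev]
      have hR : pvR (i - prev - 1) (x :: xs) = pvR (i - prev - 1 + 1) xs := by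
        simp [pvR, hx]
      rw [hR, show i - prev - 1 + 1 = i + 1 - prev - 1 by ring]
    · rw [show pvNz i (x :: xs) = i :: pvNz (i + 1) xs from by simp [pvNz, hx],
        List.cons_append, pvGaps, e, ih (i + 1) i, show i + 1 - i - 1 = (0 : Int) by ring]
      have hR : pvR (i - prev - 1) (x :: xs)
          = (if i - prev - 1 > 0 then [i - prev - 1] else []) ++ pvR 0 xs := by
        simp [pvR, hx]
      rw [hR]
      congr 1
      by_cases h : i - prev > 1
      · rw [if_pos h, if_pos (show i - prev - 1 > 0 by omega)]
      · rw [if_neg h, if_neg (show ¬ (i - prev - 1 > 0) by omega)]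

-- folding min into an Option accumulator equals Python's min over a nonempty list
theorem pvMFold_some : ∀ (t : List Int) (a : Int),
    pvMFold (some a) t = some (t.foldl min a) := by
  intro t
  induction t with
  | nil => simp [pvMFold]
  | cons h t ih =>
    intro a
    rw [pvMFold, List.foldl_cons]
    have h1 : pvOMin (some a) h = min a h := rfl
    rw [h1]
    exact ih (min a h)

theorem pvMFold_none_eq : ∀ (rs : List Int),
    (match pvMFold none rs with | none => (0 : Int) | some m => m)
      = (match rs with | [] => (0 : Int) | h :: t => t.foldl min h) := by
  intro rs
  cases rs with
  | nil => simp [pvMFold]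
  | cons h t =>
    have : pvMFold none (h :: t) = some (t.foldl min h) := by
      simp only [pvMFold, List.foldl_cons, pvOMin]
      exact pvMFold_some t h
    simp [this]

-- ===== VERDICT (by name: the statement is the Claim_ definition above) =====
theorem min_zero_segment_spec : Claim_equal_min_zero_segment := by
  intro sequence _
  unfold Spec_min_zero_segment
  simp only [min_zero_segment, min_zero_segment_alt]
  rw [pvA_fold_eq sequence none 0]
  rw [pvZipGaps_eq (pvNz 0 sequence ++ [(sequence.length : Int)]) (-1)]
  have hg := pvGaps_eq_R sequence 0 (-1)
  rw [show (0 : Int) - (-1) - 1 = 0 by ring, show (0 : Int) + (sequence.length : Int) = (sequence.length : Int) by ring] at hg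
  rw [hg]
  exact pvMFold_none_eq (pvR 0 sequence)
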